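-- pv_equiv track=rewrite | github.com/slidracoon72/leetcode | Solutions/MinLengthOfStringAfterOperations.py | minimumLength1
-- ===== SOURCE A (Python) =====
-- from collections import Counter
--
-- def minimumLength1(s: str) -> int:
--     # Step 1: Count the frequency of each character in the string
--     char_frequency_map = Counter(s)
--
--     # Step 2: Calculate the number of characters to delete
--     delete_count = 0
--     for frequency in char_frequency_map.values():
--         if frequency % 2 == 1:
--             # If frequency is odd, delete all except one
--             delete_count += frequency - 1
--         else:
--             # If frequency is even, delete all except two
--             delete_count += frequency - 2
--
--     # Step 3: Return the minimum length after deletions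
--     return len(s) - delete_count
-- ===== SOURCE B (Python) =====
-- def minimumLength1(s: str) -> int:
--     # One pass: 'seen' = distinct chars, 'parity' = chars seen an odd number of times.
--     seen = set()
--     parity = set()
--     for c in s:
--         seen.add(c)
--         if c in parity:
--             parity.remove(c)
--         else:
--             parity.add(c)
--     return 2 * len(seen) - len(parity)
-- ===== Notes on version B (the rewrite author's own statement) =====
-- stated objective: alternative
-- what changed: Replaces the frequency Counter plus a second loop over its values by a single pass that maintains a set of distinct characters and a parity-toggle set, returning 2*distinct - odd.
import Mathlib
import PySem

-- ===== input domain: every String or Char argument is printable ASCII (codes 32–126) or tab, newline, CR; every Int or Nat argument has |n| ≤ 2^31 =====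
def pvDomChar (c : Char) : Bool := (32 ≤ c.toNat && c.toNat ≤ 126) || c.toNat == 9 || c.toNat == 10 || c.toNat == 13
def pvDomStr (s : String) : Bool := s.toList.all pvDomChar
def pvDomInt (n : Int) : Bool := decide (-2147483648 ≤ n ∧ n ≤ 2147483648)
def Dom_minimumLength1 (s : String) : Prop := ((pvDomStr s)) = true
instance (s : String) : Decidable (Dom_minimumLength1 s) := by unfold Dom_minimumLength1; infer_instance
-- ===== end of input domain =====

-- B replaces the Counter + second loop over its values by a single pass maintaining
-- a set of distinct characters and a parity-toggle set, returning 2*distinct - odd. (objective: alternative)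

-- ===== PORT A =====
def minimumLength1 (s : String) : Int :=
  let charFrequencyMap := PySem.Dict.counter s.toList
  let deleteCount := (PySem.Dict.values charFrequencyMap).foldl
    (fun acc frequency =>
      if PySem.Int.mod frequency 2 == 1 then acc + (frequency - 1) else acc + (frequency - 2)) 0
  PySem.Str.len s - deleteCount

-- ===== PORT B =====
-- 'parity.remove(c)' runs only under the 'c in parity' guard, where it equals Set.discard (exact).
def minimumLength1_alt (s : String) : Int :=
  let st := s.toList.foldl
    (fun (p : PySem.Set Char × PySem.Set Char) c =>
      (PySem.Set.add p.1 c,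
       if PySem.Set.contains p.2 c then PySem.Set.discard p.2 c else PySem.Set.add p.2 c))
    ([], [])
  2 * (PySem.Set.len st.1 : Int) - (PySem.Set.len st.2 : Int)

-- ===== PRECONDITION & SPEC =====
def Spec_minimumLength1 (s : String) (out : Int) : Prop := out = minimumLength1_alt s
instance (s : String) (out : Int) : Decidable (Spec_minimumLength1 s out) := by unfold Spec_minimumLength1; infer_instance

-- ===== CLAIM (what is proved, stated in full; the proofs are below) =====
def Claim_equal_minimumLength1 : Prop := ∀ (s : String), Dom_minimumLength1 s → Spec_minimumLength1 s (minimumLength1 s)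

-- ===== LEMMAS AND PROOFS =====

-- A's delete-count loop is a sum.
theorem pv_foldl_delete (l : List Int) (a : Int) :
    l.foldl (fun acc f => if PySem.Int.mod f 2 == 1 then acc + (f - 1) else acc + (f - 2)) a
      = a + (l.map (fun f => f - (if PySem.Int.mod f 2 == 1 then 1 else 2))).sum := by
  induction l generalizing a with
  | nil => simp
  | cons x t ih =>
    simp only [List.foldl_cons, List.map_cons, List.sum_cons]
    split <;> rw [ih] <;> ring

-- Generic: Σ (if p k then 1 else 2) over a list = 2*length - #(filter p).
theorem pv_sum_ite_one_two {α : Type} (l : List α) (p : α → Bool) :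
    (l.map (fun k => if p k then (1 : Int) else 2)).sum
      = 2 * (l.length : Int) - ((l.filter p).length : Int) := by
  induction l with
  | nil => simp
  | cons x t ih =>
    by_cases h : p x <;> simp [h, ih] <;> ring

-- length of a list = Σ counts over its PySem set of distinct elements.
theorem pv_sum_counts (xs : List Char) :
    ((PySem.Set.ofList xs).map (fun k => (xs.count k : Int))).sum = (xs.length : Int) := by
  have hperm : (PySem.Set.ofList xs).Perm xs.dedup := by
    apply (List.perm_ext_iff_of_nodup (PySem.Set.nodup_ofList xs) xs.nodup_dedup).mpr
    intro a; simp [PySem.Set.mem_ofList, List.mem_dedup]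
  rw [List.Perm.sum_eq (hperm.map _)]
  have hcast : ∀ (l : List Char),
      (l.map (fun k => (xs.count k : Int))).sum = (((l.map (fun k => xs.count k)).sum : Nat) : Int) := by
    intro l; induction l with
    | nil => simp
    | cons x t ih => simp [ih]
  rw [hcast]
  exact_mod_cast List.sum_map_count_dedup_eq_length xs

-- B's loop invariant.
theorem pv_alt_invariant (xs pre : List Char) (seen parity : PySem.Set Char)
    (hseen : seen = PySem.Set.ofList pre) (hnd : parity.Nodup)
    (hmem : ∀ c, c ∈ parity ↔ pre.count c % 2 = 1) :
    let st := xs.foldl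
      (fun (p : PySem.Set Char × PySem.Set Char) c =>
        (PySem.Set.add p.1 c,
         if PySem.Set.contains p.2 c then PySem.Set.discard p.2 c else PySem.Set.add p.2 c))
      (seen, parity)
    st.1 = PySem.Set.ofList (pre ++ xs) ∧ st.2.Nodup ∧
      ∀ c, c ∈ st.2 ↔ (pre ++ xs).count c % 2 = 1 := by
  induction xs generalizing pre seen parity with
  | nil => simpa using ⟨hseen, hnd, hmem⟩
  | cons x t ih =>
    simp only [List.foldl_cons]
    have hcount : ∀ c, (pre ++ [x]).count c = pre.count c + (if x = c then 1 else 0) := by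
      intro c; simp [List.count_append, List.count_singleton]
    by_cases hx : x ∈ parity
    · have := ih (pre ++ [x]) (PySem.Set.add seen x) (PySem.Set.discard parity x)
        (by rw [hseen, PySem.Set.ofList_append_singleton])
        (PySem.Set.nodup_discard parity x hnd)
        (by
          intro c
          rw [PySem.Set.mem_discard, hcount c]
          by_cases hxc : x = c
          · subst hxc
            have hodd := (hmem x).mp hx
            simp; omega
          · have : ¬ c = x := fun h => hxc h.symm
            simp [hxc, this, hmem c])
      simpa [hx, List.append_assoc] using this
    · have := ih (pre ++ [x]) (PySem.Set.add seen x) (PySem.Set.add parity x)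
        (by rw [hseen, PySem.Set.ofList_append_singleton])
        (PySem.Set.nodup_add parity x hnd)
        (by
          intro c
          rw [PySem.Set.mem_add, hcount c]
          by_cases hxc : x = c
          · subst hxc
            have heven : ¬ pre.count x % 2 = 1 := fun h => hx ((hmem x).mpr h)
            simp [hmem x, heven]; omega
          · have : ¬ c = x := fun h => hxc h.symm
            simp [hxc, this, hmem c])
      simpa [hx, List.append_assoc] using this

-- Σ of a pointwise difference splits.
theorem pv_sum_map_sub (l : List Char) (f g : Char → Int) :
    (l.map (fun k => f k - g k)).sum = (l.map f).sum - (l.map g).sum := by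
  induction l with
  | nil => simp
  | cons x t ih => simp [ih]; ring

-- A's Int-mod parity test is the Nat parity of the count.
theorem pv_mod_two (m : Nat) : (PySem.Int.mod (m : Int) 2 == 1) = decide (m % 2 = 1) := by
  have h : ((2 : Nat) : Int) = (2 : Int) := by norm_num
  rw [← h, PySem.Int.mod_natCast m 2]
  by_cases hh : m % 2 = 1
  · simp [hh]
  · simp [hh]; omega

-- ===== VERDICT (by name: the statement is the Claim_ definition above) =====
theorem minimumLength1_spec : Claim_equal_minimumLength1 := by
  intro s _
  unfold Spec_minimumLength1 minimumLength1 minimumLength1_alt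
  dsimp only
  obtain ⟨h1, h2, h3⟩ := pv_alt_invariant s.toList [] [] [] rfl List.nodup_nil (by simp)
  simp only [List.nil_append] at h1 h3
  set xs := s.toList with hxs
  set S := PySem.Set.ofList xs with hS
  set p : Char → Bool := fun k => PySem.Int.mod ((xs.count k : Nat) : Int) 2 == 1 with hp
  -- A's value
  rw [pv_foldl_delete]
  have hvals : PySem.Dict.values (PySem.Dict.counter xs) = S.map (fun k => (xs.count k : Int)) := by
    show (PySem.Dict.counter xs).items.map (·.2) = _
    rw [PySem.Dict.items_counter, List.map_map]; rfl
  rw [hvals, List.map_map]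
  have hcomp : ((fun f => f - if PySem.Int.mod f 2 == 1 then (1 : Int) else 2) ∘
      fun k => (xs.count k : Int)) =
      fun k => (xs.count k : Int) - (if p k then (1 : Int) else 2) := by
    funext k; simp [hp]
  rw [hcomp, pv_sum_map_sub, pv_sum_counts, pv_sum_ite_one_two]
  -- B's value
  rw [h1]
  have hperm : (List.foldl (fun (p : PySem.Set Char × PySem.Set Char) c =>
        (PySem.Set.add p.1 c,
         if PySem.Set.contains p.2 c then PySem.Set.discard p.2 c else PySem.Set.add p.2 c))
      ([], []) xs).2.Perm (S.filter p) := by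
    apply (List.perm_ext_iff_of_nodup h2 ((PySem.Set.nodup_ofList xs).filter p)).mpr
    intro c
    rw [List.mem_filter, h3 c, hp]
    simp only [PySem.Set.mem_ofList, pv_mod_two, decide_eq_true_eq]
    constructor
    · intro hodd
      exact ⟨List.count_pos_iff.mp (by omega), hodd⟩
    · intro ⟨_, hodd⟩; exact hodd
  rw [PySem.Set.len, PySem.Set.len, hperm.length_eq, PySem.Str.len_eq, ← hxs]
  ring
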